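-- pv_equiv track=rewrite | github.com/di3italis/python_functions_240523 | wed-operators-2/problems/01-first-before-second.py | first_before_second
-- ===== SOURCE A (Python) =====
-- def first_before_second(s, a, b):
--     # collect indices of a and b
--     a_list = []
--     b_list = []
--     # iterate through the string
--     for i in range(len(s)):
--         if s[i] == a:
--             a_list.append(i)
--         if s[i] == b:
--             b_list.append(i)
--     # check if a comes before b
--     for a in a_list:
--         for b in b_list:
--             if a > b:
--                 return False
--     return True
-- ===== SOURCE B (Python) =====
-- def first_before_second(s, a, b):
--     seen_b = False
--     for ch in s:
--         if ch == a and seen_b: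
--             return False
--         if ch == b:
--             seen_b = True
--     return True
-- ===== Notes on version B (the rewrite author's own statement) =====
-- stated objective: simpler
-- what changed: Replaced A's two-phase approach (collect all index lists, then nested quadratic pair comparison) with a single linear scan keeping one seen_b flag.
import Mathlib
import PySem

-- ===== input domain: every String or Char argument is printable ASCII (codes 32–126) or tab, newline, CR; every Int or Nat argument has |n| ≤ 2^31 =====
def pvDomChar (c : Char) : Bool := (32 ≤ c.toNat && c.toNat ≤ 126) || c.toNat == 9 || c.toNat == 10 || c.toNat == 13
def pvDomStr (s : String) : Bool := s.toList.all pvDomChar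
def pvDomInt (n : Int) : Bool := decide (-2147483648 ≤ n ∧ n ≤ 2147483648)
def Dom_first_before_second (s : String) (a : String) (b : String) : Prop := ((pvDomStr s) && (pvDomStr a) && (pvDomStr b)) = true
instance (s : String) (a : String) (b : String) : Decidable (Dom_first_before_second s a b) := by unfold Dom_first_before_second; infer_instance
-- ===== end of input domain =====

-- B replaces A's two index lists + nested pair loop by one linear scan with a seen_b flag (simpler, one pass).

-- ===== PORT A =====
-- A: one loop over range(len(s)) collecting the indices where s[i]==a and where s[i]==b,
-- then nested loops returning False as soon as some a-index exceeds some b-index.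
def first_before_second (s : String) (a : String) (b : String) : Bool :=
  let cs := s.toList
  let ab := cs.zipIdx.foldl
    (fun (acc : List Nat × List Nat) ci =>
      ((if String.ofList [ci.1] == a then acc.1 ++ [ci.2] else acc.1),
       (if String.ofList [ci.1] == b then acc.2 ++ [ci.2] else acc.2)))
    ([], [])
  -- nested for-loops with early 'return False' ⇔ no pair with a_idx > b_idx
  !(ab.1.any fun ai => ab.2.any fun bi => decide (bi < ai))

-- ===== PORT B =====
-- B: single scan carrying the seen_b flag.
def fbsGo (a : String) (b : String) : List Char → Bool → Bool
  | [], _ => true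
  | c :: r, seenB =>
    if String.ofList [c] == a && seenB then false
    else fbsGo a b r (seenB || String.ofList [c] == b)

def first_before_second_alt (s : String) (a : String) (b : String) : Bool :=
  fbsGo a b s.toList false

-- ===== PRECONDITION & SPEC =====
def Spec_first_before_second (s : String) (a : String) (b : String) (out : Bool) : Prop := out = first_before_second_alt s a b
instance (s : String) (a : String) (b : String) (out : Bool) : Decidable (Spec_first_before_second s a b out) := by unfold Spec_first_before_second; infer_instance

-- ===== CLAIM (what is proved, stated in full; the proofs are below) =====
def Claim_equal_first_before_second : Prop := ∀ (s : String) (a : String) (b : String), Dom_first_before_second s a b → Spec_first_before_second s a b (first_before_second s a b)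

-- ===== LEMMAS AND PROOFS =====

-- "some b-occurrence strictly precedes some a-occurrence" on a char list
def crossC (Pb Qb : Char → Bool) : List Char → Bool
  | [] => false
  | c :: r => (Qb c && r.any Pb) || crossC Pb Qb r

def anyCross (al bl : List Nat) : Bool :=
  al.any fun ai => bl.any fun bi => decide (bi < ai)

lemma any_lt_of_bounded (bl : List Nat) (k : Nat) (h : ∀ x ∈ bl, x < k) :
    (bl.any fun x => decide (x < k)) = !bl.isEmpty := by
  cases bl with
  | nil => simp
  | cons c r => simp [h c (by simp)]

lemma anyCross_append_right (al bl : List Nat) (k : Nat) (ha : ∀ x ∈ al, x < k) :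
    anyCross al (bl ++ [k]) = anyCross al bl := by
  unfold anyCross
  rw [Bool.eq_iff_iff]
  simp only [List.any_eq_true, List.any_append, List.any_nil, List.any_cons,
    Bool.or_eq_true, decide_eq_true_eq]
  constructor
  · rintro ⟨ai, hai, h | h⟩
    · exact ⟨ai, hai, h⟩
    · rcases h with h | h
      · have := ha ai hai; omega
      · simp at h
  · rintro ⟨ai, hai, h⟩
    exact ⟨ai, hai, Or.inl h⟩

lemma anyCross_append_left (al bl : List Nat) (k : Nat) :
    anyCross (al ++ [k]) bl = (anyCross al bl || bl.any fun x => decide (x < k)) := by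
  simp [anyCross, List.any_append]

lemma foldA (Pb Qb : Char → Bool) (l : List Char) :
    ∀ (k : Nat) (al bl : List Nat), (∀ x ∈ al, x < k) → (∀ x ∈ bl, x < k) →
    anyCross
      (l.zipIdx k |>.foldl
        (fun (acc : List Nat × List Nat) ci =>
          ((if Pb ci.1 then acc.1 ++ [ci.2] else acc.1),
           (if Qb ci.1 then acc.2 ++ [ci.2] else acc.2))) (al, bl)).1
      (l.zipIdx k |>.foldl
        (fun (acc : List Nat × List Nat) ci =>
          ((if Pb ci.1 then acc.1 ++ [ci.2] else acc.1),
           (if Qb ci.1 then acc.2 ++ [ci.2] else acc.2))) (al, bl)).2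
    = (anyCross al bl || (!bl.isEmpty && l.any Pb) || crossC Pb Qb l) := by
  induction l with
  | nil => intro k al bl ha hb; simp [crossC, List.zipIdx]
  | cons c r ih =>
    intro k al bl ha hb
    have hstep : (c :: r).zipIdx k = (c, k) :: r.zipIdx (k + 1) := by simp [List.zipIdx]
    rw [hstep]
    simp only [List.foldl_cons]
    set al1 := (if Pb c then al ++ [k] else al) with hal1
    set bl1 := (if Qb c then bl ++ [k] else bl) with hbl1
    have ha1 : ∀ x ∈ al1, x < k + 1 := by
      intro x hx
      rw [hal1] at hx
      by_cases hP : Pb c = true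
      · rw [if_pos hP] at hx
        rcases List.mem_append.1 hx with h | h
        · exact Nat.lt_succ_of_lt (ha x h)
        · simp at h; omega
      · rw [if_neg hP] at hx
        exact Nat.lt_succ_of_lt (ha x hx)
    have hb1 : ∀ x ∈ bl1, x < k + 1 := by
      intro x hx
      rw [hbl1] at hx
      by_cases hQ : Qb c = true
      · rw [if_pos hQ] at hx
        rcases List.mem_append.1 hx with h | h
        · exact Nat.lt_succ_of_lt (hb x h)
        · simp at h; omega
      · rw [if_neg hQ] at hx
        exact Nat.lt_succ_of_lt (hb x hx)
    rw [ih (k + 1) al1 bl1 ha1 hb1]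
    rw [hal1, hbl1]
    simp only [crossC, List.any_cons]
    cases hP : Pb c <;> cases hQ : Qb c <;>
      simp only [if_pos, Bool.false_eq_true, reduceIte] <;>
      [skip;
       rw [anyCross_append_right al bl k ha];
       rw [anyCross_append_left al bl k, any_lt_of_bounded bl k hb];
       rw [anyCross_append_left al (bl ++ [k]) k,
           anyCross_append_right al bl k ha,
           List.any_append, any_lt_of_bounded bl k hb]] <;>
      cases anyCross al bl <;> cases bl.isEmpty <;> cases r.any Pb <;>
        cases crossC Pb Qb r <;> simp

lemma goB_eq (a b : String) (l : List Char) :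
    ∀ sb, fbsGo a b l sb
      = !((sb && l.any fun c => String.ofList [c] == a)
          || crossC (fun c => String.ofList [c] == a) (fun c => String.ofList [c] == b) l) := by
  induction l with
  | nil => intro sb; simp [fbsGo, crossC]
  | cons c r ih =>
    intro sb
    simp only [fbsGo, crossC, List.any_cons]
    cases hP : (String.ofList [c] == a) <;> cases hsb : sb <;> cases hQ : (String.ofList [c] == b) <;>
      simp [ih]

-- ===== VERDICT (by name: the statement is the Claim_ definition above) =====
theorem first_before_second_spec : Claim_equal_first_before_second := by
  intro s a b _
  unfold Spec_first_before_second first_before_second_alt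
  simp only [first_before_second]
  rw [goB_eq]
  have h := foldA (fun c => String.ofList [c] == a) (fun c => String.ofList [c] == b)
    s.toList 0 [] [] (by simp) (by simp)
  unfold anyCross at h
  beta_reduce at h
  rw [h]
  simp
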